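-- pv_equiv track=rewrite | github.com/DiXionTeil/hw_by_me | Matzo_python/in_work/massives.py | massive_abs_min_max
-- ===== SOURCE A (Python) =====
-- def massive_abs_min_max(min_val: int, n: int):
--     def massive_n(n, min_value):
--         mass_n = f'{abs(min_value)}'
--         for i in range(min_value + 1, n + 1):
--             mass_n += '\t' + ''.join(str(abs(i)))
--         return mass_n
--
--     mass = ''
--     for i in range(min_val, n + 1):
--         mass += massive_n(n, min_val) + '\n'
--         n += 1
--         min_val += 1
--     return mass
-- ===== SOURCE B (Python) =====
-- def massive_abs_min_max(min_val: int, n: int):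
--     m = n - min_val + 1
--     if m <= 0:
--         return ''
--     vals = [str(abs(min_val + s)) for s in range(2 * m - 1)]
--     return ''.join('\t'.join(vals[k:k + m]) + '\n' for k in range(m))
-- ===== Notes on version B (the rewrite author's own statement) =====
-- stated objective: alternative
-- what changed: A rebuilds every row cell by cell with a nested loop over mutating min_val/n; B precomputes the 2m-1 distinct cell strings once (cell (k,j) depends only on k+j) and assembles each row by slicing and joining that flat table.
import Mathlib
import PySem

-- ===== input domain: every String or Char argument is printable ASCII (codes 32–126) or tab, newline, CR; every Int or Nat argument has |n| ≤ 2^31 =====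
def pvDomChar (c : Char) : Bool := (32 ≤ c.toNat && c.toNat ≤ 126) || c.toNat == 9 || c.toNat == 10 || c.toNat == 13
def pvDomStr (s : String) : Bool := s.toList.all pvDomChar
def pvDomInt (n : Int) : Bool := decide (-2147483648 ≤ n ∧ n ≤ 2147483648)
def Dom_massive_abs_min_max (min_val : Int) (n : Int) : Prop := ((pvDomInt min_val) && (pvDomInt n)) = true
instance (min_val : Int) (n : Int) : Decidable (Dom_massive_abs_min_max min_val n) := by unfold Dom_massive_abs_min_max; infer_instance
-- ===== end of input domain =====

-- B replaces A's per-row re-computation of every cell (each row rebuilt by an inner loop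
-- while min_val and n are mutated) by one precomputed flat table of the 2m-1 distinct
-- cell strings (cell (k,j) depends only on k+j) sliced per row; same return value.

-- ===== PORT A =====
-- inner helper massive_n(n, min_value): row = str(abs(min_value)), then '\t'+str(abs(i)) appended for i in range(min_value+1, n+1)
def pvARow (n : Int) (min_value : Int) : String :=
  (PySem.List.pyRange (min_value + 1) (n + 1) 1).foldl
    (fun acc i => acc ++ "\t" ++ PySem.Int.toStr |i|) (PySem.Int.toStr |min_value|)

-- the outer for-loop: its range is fixed at entry; mass/n/min_val are the mutating state
def pvALoop : List Int → String → Int → Int → String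
  | [], mass, _, _ => mass
  | _ :: rest, mass, n, mv => pvALoop rest (mass ++ pvARow n mv ++ "\n") (n + 1) (mv + 1)

def massive_abs_min_max (min_val : Int) (n : Int) : String :=
  pvALoop (PySem.List.pyRange min_val (n + 1) 1) "" n min_val

-- ===== PORT B =====
def massive_abs_min_max_alt (min_val : Int) (n : Int) : String :=
  let m := n - min_val + 1
  if m ≤ 0 then ""
  else
    let vals := (PySem.List.pyRange 0 (2 * m - 1) 1).map (fun s => PySem.Int.toStr |min_val + s|)
    PySem.Str.join ""
      (((PySem.List.pyRange 0 m 1).map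
          (fun k => PySem.Str.join "\t" (PySem.List.slice vals (some k) (some (k + m))))).map
        (· ++ "\n"))

-- ===== PRECONDITION & SPEC =====
def Spec_massive_abs_min_max (min_val : Int) (n : Int) (out : String) : Prop := out = massive_abs_min_max_alt min_val n
instance (min_val : Int) (n : Int) (out : String) : Decidable (Spec_massive_abs_min_max min_val n out) := by unfold Spec_massive_abs_min_max; infer_instance

-- ===== CLAIM (what is proved, stated in full; the proofs are below) =====
def Claim_equal_massive_abs_min_max : Prop := ∀ (min_val : Int) (n : Int), Dom_massive_abs_min_max min_val n → Spec_massive_abs_min_max min_val n (massive_abs_min_max min_val n)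

-- ===== LEMMAS AND PROOFS =====

-- canonical character-level forms shared by the two sides' proofs
def pvRowC (a : Int) (w : Nat) : List Char :=
  PySem.Chars.join ['\t'] ((List.range w).map (fun (j : Nat) => PySem.Int.toChars |a + (j : Int)|))

def pvGridC (mv : Int) (w : Nat) : Nat → List Char
  | 0 => []
  | Nat.succ t => pvRowC mv w ++ ['\n'] ++ pvGridC (mv + 1) w t

lemma pv_join_cons (sep : List Char) (x : List Char) (xs : List (List Char)) :
    PySem.Chars.join sep (x :: xs) = x ++ xs.flatMap (fun y => sep ++ y) := by
  induction xs generalizing x with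
  | nil => simp [PySem.Chars.join_singleton]
  | cons y ys ih =>
      rw [PySem.Chars.join_cons_cons, ih y]
      simp

lemma pv_join_empty_sep (xs : List (List Char)) :
    PySem.Chars.join [] xs = xs.flatten := by
  cases xs with
  | nil => simp [PySem.Chars.join_nil]
  | cons x t => rw [pv_join_cons]; simp [List.flatMap_def]

lemma pvARow_foldl (l : List Int) (s : String) :
    ((l.foldl (fun acc i => acc ++ "\t" ++ PySem.Int.toStr |i|) s)).toList
      = s.toList ++ l.flatMap (fun i => '\t' :: PySem.Int.toChars |i|) := by
  induction l generalizing s with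
  | nil => simp
  | cons x t ih =>
      simp only [List.foldl_cons, ih, List.flatMap_cons, String.toList_append,
        PySem.Int.toList_toStr]
      simp [List.append_assoc]

lemma pvARow_toList (n mv : Int) (h : mv ≤ n) :
    (pvARow n mv).toList = pvRowC mv (n - mv + 1).toNat := by
  unfold pvARow pvRowC
  rw [pvARow_foldl, PySem.List.pyRange_one]
  have hw : (n - mv + 1).toNat = (n + 1 - (mv + 1)).toNat + 1 := by omega
  rw [hw, List.range_succ_eq_map, List.map_cons, List.map_map, pv_join_cons]
  simp only [PySem.Int.toList_toStr, Function.comp_def]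
  congr 1
  · norm_num
  · rw [List.flatMap_map, List.flatMap_map]
    congr 1
    funext k
    have : mv + 1 + (k : Int) = mv + ((k : Nat).succ : Int) := by push_cast; ring
    simp [this]

lemma pvALoop_toList (l : List Int) (mass : String) (n mv : Int) (h : mv ≤ n) :
    (pvALoop l mass n mv).toList = mass.toList ++ pvGridC mv (n - mv + 1).toNat l.length := by
  induction l generalizing mass n mv with
  | nil => simp [pvALoop, pvGridC]
  | cons x t ih =>
      simp only [pvALoop, List.length_cons]
      rw [ih _ _ _ (by omega)]
      have he : (n + 1 - (mv + 1) + 1).toNat = (n - mv + 1).toNat := by omega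
      rw [he]
      simp only [pvGridC, String.toList_append, pvARow_toList n mv h]
      simp [List.append_assoc]

lemma drop_take_map_range {α : Type} (G : Nat → α) (N k w : Nat) (h : k + w ≤ N) :
    (((List.range N).map G).drop k).take w = (List.range w).map (fun j => G (k + j)) := by
  apply List.ext_getElem
  · simp; omega
  · intro i h1 h2
    simp only [List.getElem_take, List.getElem_drop, List.getElem_map, List.getElem_range]

lemma pvGridC_eq_flatten (mv : Int) (w c : Nat) :
    pvGridC mv w c = ((List.range c).map (fun (k : Nat) => pvRowC (mv + (k : Int)) w ++ ['\n'])).flatten := by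
  induction c generalizing mv with
  | zero => simp [pvGridC]
  | succ t ih =>
      rw [List.range_succ_eq_map, List.map_cons, List.map_map]
      simp only [pvGridC, ih]
      congr 1
      · norm_num
      · congr 1
        apply List.map_congr_left
        intro k _
        simp only [Function.comp_def]
        have : mv + (((Nat.succ k) : Nat) : Int) = mv + 1 + (k : Int) := by push_cast; ring
        rw [this]

-- ===== VERDICT (by name: the statement is the Claim_ definition above) =====
theorem massive_abs_min_max_spec : Claim_equal_massive_abs_min_max := by
  intro mv n _
  unfold Spec_massive_abs_min_max massive_abs_min_max massive_abs_min_max_alt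
  by_cases hm : n - mv + 1 <= 0
  · rw [if_pos hm, PySem.List.pyRange_one_eq_nil (by omega)]
    rfl
  · rw [if_neg hm]
    rw [← String.toList_inj]
    obtain ⟨w, hmw⟩ : ∃ w : Nat, n - mv + 1 = (w : Int) := ⟨(n - mv + 1).toNat, by omega⟩
    have hw1 : 1 ≤ w := by omega
    -- A side
    rw [pvALoop_toList _ _ _ _ (by omega), PySem.List.length_pyRange_one]
    rw [show (n + 1 - mv).toNat = w by omega, show (n - mv + 1).toNat = w by omega]
    -- B side
    rw [PySem.Str.toList_join]
    simp only [String.toList_empty]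
    rw [pv_join_empty_sep, List.map_map, hmw]
    rw [show (2 * (w : Int) - 1) = ((2 * w - 1 : Nat) : Int) by omega]
    rw [PySem.List.pyRange_zero_natCast, PySem.List.pyRange_zero_natCast, List.map_map, List.map_map]
    rw [pvGridC_eq_flatten]
    simp only [List.nil_append]
    congr 1
    apply List.map_congr_left
    intro k0 hk0
    have hk0w : k0 < w := List.mem_range.mp hk0
    simp only [Function.comp_def]
    rw [String.toList_append, PySem.Str.toList_join]
    rw [PySem.List.slice_natCast_add, List.map_map]
    rw [drop_take_map_range _ (2 * w - 1) k0 w (by omega), List.map_map]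
    unfold pvRowC
    have ht : "\t".toList = ['\t'] := rfl
    have hn : "\n".toList = ['\n'] := rfl
    rw [ht, hn]
    congr 2
    apply List.map_congr_left
    intro j _
    simp only [Function.comp_def, PySem.Int.toList_toStr]
    have : mv + (((k0 + j : Nat)) : Int) = mv + (k0 : Int) + (j : Int) := by push_cast; ring
    rw [this]
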